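-- pv_equiv track=rewrite | github.com/ISUCT/Algorithm_2024 | python/src/module3/zadacha4.py | min_len_length
-- ===== SOURCE A (Python) =====
-- def z_function(string):
--     Z = [0] * len(string)
--     left = 0
--     right = 0
--     max_indx = 0
--     for i in range(1, len(string)):
--         if i <= right:
--             Z[i] = min(right - i + 1, Z[i - left])
--         while i + Z[i] < len(string) and string[Z[i]] == string[Z[i] + i]:
--             Z[i] += 1
--
--         if Z[i] > Z[max_indx]:
--             max_indx = i
--
--         if i + Z[i] - 1 > right:
--             left = i
--             right = i + Z[i] - 1
--
--     return Z, max_indx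
--
-- def min_len_length(string):
--     z, max_indx = z_function(string)
--     if max_indx + z[max_indx] == len(string):
--         return len(string) - z[max_indx]
--     else:
--         k = 0
--         for i in range(len(string) - 1, -1, -1):
--             if z[i] > k and z[i] < z[max_indx] and i + z[i] == len(string):
--                 k = z[i]
--
--         return len(string) - k
-- ===== SOURCE B (Python) =====
-- def min_len_length(string):
--     # Simpler: Z-array computed naively (direct prefix comparison, no Z-box),
--     # first-argmax via max(key=...), tail as a plain max over a generator.
--     n = len(string)
--     z = [0] * n
--     for i in range(1, n):
--         c = 0
--         while i + c < n and string[c] == string[i + c]: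
--             c += 1
--         z[i] = c
--     max_indx = max(range(n), key=lambda j: z[j])
--     zm = z[max_indx]
--     if max_indx + zm == n:
--         return n - zm
--     k = max((z[i] for i in range(n) if z[i] < zm and i + z[i] == n), default=0)
--     return n - k
-- ===== Notes on version B (the rewrite author's own statement) =====
-- stated objective: simpler
-- what changed: The Z-array is computed naively by direct prefix comparison from index 0 (no left/right Z-box window), the first argmax is taken with max(range(n), key=...), and the tail's backward accumulator loop becomes a plain max over a generator; Pre_ excludes only the empty string, on which both implementations raise.
-- outside the precondition, e.g. on min_len_length(''): A raises IndexError, B raises ValueError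
import Mathlib
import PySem

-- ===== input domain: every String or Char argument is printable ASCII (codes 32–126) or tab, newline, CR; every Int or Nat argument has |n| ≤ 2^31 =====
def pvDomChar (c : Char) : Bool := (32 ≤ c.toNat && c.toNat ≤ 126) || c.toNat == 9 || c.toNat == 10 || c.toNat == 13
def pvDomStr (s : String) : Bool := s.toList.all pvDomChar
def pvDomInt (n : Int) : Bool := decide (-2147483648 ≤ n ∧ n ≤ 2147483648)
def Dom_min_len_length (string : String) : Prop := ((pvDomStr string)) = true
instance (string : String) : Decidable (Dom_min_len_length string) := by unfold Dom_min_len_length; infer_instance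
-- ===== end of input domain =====

-- B computes the Z-array naively (direct prefix comparison, no left/right Z-box) with max()-style
-- argmax and tail; proved to return A's value on every non-empty string (both raise on "").

-- ===== PORT A =====
-- the inner extension loop 'while i+z < n and s[z] == s[z+i]: z += 1' (appears verbatim in both Pythons)
def matchExt (l : List Char) (i : Nat) (z : Nat) : Nat :=
  if h : i + z < l.length ∧ l.getD z 'a' = l.getD (z + i) 'a' then matchExt l i (z + 1) else z
  termination_by l.length - (i + z)
  decreasing_by obtain ⟨h1, -⟩ := h; omega

-- one iteration of A's for-loop: state (Z, left, right, max_indx)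
def zStep (l : List Char) (st : List Nat × Nat × Nat × Nat) (i : Nat) : List Nat × Nat × Nat × Nat :=
  let Z := st.1
  let left := st.2.1
  let right := st.2.2.1
  let mi := st.2.2.2
  let z0 := if i ≤ right then min (right - i + 1) (Z.getD (i - left) 0) else 0
  let zi := matchExt l i z0
  let Z' := Z.set i zi
  let mi' := if zi > Z'.getD mi 0 then i else mi
  if i + zi - 1 > right then (Z', i, i + zi - 1, mi') else (Z', left, right, mi')

def z_function (l : List Char) : List Nat × Nat :=
  let st := (List.range' 1 (l.length - 1)).foldl (zStep l) (List.replicate l.length 0, 0, 0, 0)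
  (st.1, st.2.2.2)

def min_len_length (string : String) : Int :=
  let l := string.toList
  let n := l.length
  let p := z_function l
  let z := p.1
  let mi := p.2
  let zm := z.getD mi 0
  if mi + zm = n then (n : Int) - (zm : Int)
  else
    let k := ((List.range n).reverse).foldl
      (fun k i => if z.getD i 0 > k ∧ z.getD i 0 < zm ∧ i + z.getD i 0 = n then z.getD i 0 else k) 0
    (n : Int) - (k : Int)

-- ===== PORT B =====
def min_len_length_alt (string : String) : Int :=
  let l := string.toList
  let n := l.length
  let z := (List.range n).map (fun i => if i = 0 then 0 else matchExt l i 0)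
  let mi := (List.range n).foldl (fun a i => if z.getD i 0 > z.getD a 0 then i else a) 0
  let zm := z.getD mi 0
  if mi + zm = n then (n : Int) - (zm : Int)
  else
    let k := (((List.range n).filter
        (fun i => decide (z.getD i 0 < zm ∧ i + z.getD i 0 = n))).map
        (fun i => z.getD i 0)).foldl max 0
    (n : Int) - (k : Int)

-- ===== PRECONDITION & SPEC =====
-- Pre_ excludes only the empty string, on which A raises IndexError (and B raises ValueError).
def Pre_min_len_length (string : String) : Prop := string.toList ≠ []
instance (string : String) : Decidable (Pre_min_len_length string) := by unfold Pre_min_len_length; infer_instance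
def pvWitness_min_len_length : String := "aabaab"
def Spec_min_len_length (string : String) (out : Int) : Prop := out = min_len_length_alt string
instance (string : String) (out : Int) : Decidable (Spec_min_len_length string out) := by unfold Spec_min_len_length; infer_instance

-- ===== CLAIM =====
def Claim_equal_min_len_length : Prop := ∀ (string : String), Dom_min_len_length string → Pre_min_len_length string → Spec_min_len_length string (min_len_length string)

-- ===== LEMMAS AND PROOFS =====

-- the naive Z-value at index j (B's per-index value)
def gz (l : List Char) (j : Nat) : Nat := if j = 0 then 0 else matchExt l j 0

-- first argmax of gz over range m (running form)
def miFold (l : List Char) (m : Nat) : Nat :=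
  (List.range m).foldl (fun a j => if gz l j > gz l a then j else a) 0

theorem matchExt_spec (l : List Char) (i z : Nat) :
    ∀ j, z ≤ j → j < matchExt l i z → i + j < l.length ∧ l.getD j 'a' = l.getD (j + i) 'a' := by
  fun_induction matchExt l i z with
  | case1 z h ih =>
    intro j hj1 hj2
    rcases Nat.eq_or_lt_of_le hj1 with rfl | hlt
    · exact ⟨by omega, h.2⟩
    · exact ih j hlt hj2
  | case2 z h => intro j hj1 hj2; omega

theorem matchExt_step (l : List Char) (i z : Nat)
    (h1 : i + z < l.length) (h2 : l.getD z 'a' = l.getD (z + i) 'a') :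
    matchExt l i z = matchExt l i (z + 1) := by
  rw [matchExt]; rw [dif_pos ⟨h1, h2⟩]

theorem matchExt_of_valid (l : List Char) (i v : Nat)
    (h : ∀ j, j < v → i + j < l.length ∧ l.getD j 'a' = l.getD (j + i) 'a') :
    matchExt l i v = matchExt l i 0 := by
  induction v with
  | zero => rfl
  | succ v ih =>
    have hv := h v (by omega)
    rw [← matchExt_step l i v (by omega) hv.2]
    exact ih (fun j hj => h j (by omega))

theorem matchExt_zero_left (l : List Char) (z : Nat) (h : z ≤ l.length) :
    matchExt l 0 z = l.length := by
  fun_induction matchExt l 0 z with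
  | case1 z h' ih => exact ih (by omega)
  | case2 z h' =>
    simp only [Nat.zero_add] at h'
    by_contra hne
    exact h' ⟨by omega, rfl⟩

theorem miFold_succ (l : List Char) (m : Nat) :
    miFold l (m + 1) = if gz l m > gz l (miFold l m) then m else miFold l m := by
  unfold miFold
  rw [List.range_succ, List.foldl_append, List.foldl_cons, List.foldl_nil]

theorem miFold_lt (l : List Char) (m : Nat) (h : 1 ≤ m) : miFold l m < m := by
  induction m with
  | zero => omega
  | succ m ih =>
    rw [miFold_succ]
    rcases Nat.eq_zero_or_pos m with rfl | hm
    · simp [miFold]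
    · have := ih hm
      split <;> omega

-- the loop invariant for A's fold (state (Z, left, right, mi) after processing i = 1..m-1)
def ZInv (l : List Char) (m : Nat) (st : List Nat × Nat × Nat × Nat) : Prop :=
  st.1.length = l.length ∧
  (∀ j, st.1.getD j 0 = if 1 ≤ j ∧ j < m then matchExt l j 0 else 0) ∧
  st.2.2.2 = miFold l m ∧
  st.2.1 < m ∧
  (st.2.1 = 0 → st.2.2.1 = 0) ∧
  (st.2.2.1 < st.2.1 ∨ st.2.2.1 + 1 ≤ st.2.1 + matchExt l st.2.1 0)

theorem getD_set_eq_ite (Z : List Nat) (i j v : Nat) (hi : i < Z.length) :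
    (Z.set i v).getD j 0 = if j = i then v else Z.getD j 0 := by
  simp only [List.getD_eq_getElem?_getD, List.getElem?_set]
  split
  · next h => subst h; simp [hi]
  · next h =>
    split
    · next h2 => omega
    · rfl

theorem zStep_inv (l : List Char) (m : Nat) (st : List Nat × Nat × Nat × Nat)
    (hm1 : 1 ≤ m) (hmn : m < l.length) (h : ZInv l m st) :
    ZInv l (m + 1) (zStep l st m) := by
  obtain ⟨hlen, hZ, hmi, hleft, hl0, hbox⟩ := h
  obtain ⟨Z, left, right, mi⟩ := st
  simp only at hlen hZ hmi hleft hl0 hbox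
  unfold zStep
  simp only
  -- the initial value z0 only sees matched prefix positions
  set z0 := (if m ≤ right then min (right - m + 1) (Z.getD (m - left) 0) else 0) with hz0
  have hM : ∀ j, j < z0 → m + j < l.length ∧ l.getD j 'a' = l.getD (j + m) 'a' := by
    intro j hj
    rw [hz0] at hj
    by_cases hmr : m ≤ right
    · rw [if_pos hmr] at hj
      -- box is live: left < m ≤ right
      have hlr : left < right := by omega
      have hbox' : right + 1 ≤ left + matchExt l left 0 := by omega
      have hleft1 : 1 ≤ left := by
        by_contra h0
        have := hl0 (by omega)
        omega
      have hil : 1 ≤ m - left ∧ m - left < m := by omega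
      rw [hZ (m - left), if_pos hil] at hj
      have hj1 : j < matchExt l (m - left) 0 := by omega
      have hj2 : j ≤ right - m := by omega
      have hs1 := matchExt_spec l (m - left) 0 j (by omega) hj1
      -- transport along the box: positions (m-left)+j and m+j agree with the prefix
      have hj3 : (m - left) + j < matchExt l left 0 := by omega
      have hs2 := matchExt_spec l left 0 ((m - left) + j) (by omega) hj3
      have he1 : (m - left) + j + left = j + m := by omega
      have he2 : j + (m - left) = (m - left) + j := by omega
      constructor
      · omega
      · rw [hs1.2, he2, hs2.2, he1]
    · rw [if_neg hmr] at hj; omega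
  set zi := matchExt l m z0 with hzi
  have hziN : zi = matchExt l m 0 := matchExt_of_valid l m z0 hM
  have hmlen : m < Z.length := by omega
  have hmiF := hmi
  have hmilt : mi < m := by rw [hmi]; exact miFold_lt l m hm1
  -- Z after set
  have hZ' : ∀ j, (Z.set m zi).getD j 0 = if 1 ≤ j ∧ j < m + 1 then matchExt l j 0 else 0 := by
    intro j
    rw [getD_set_eq_ite Z m j zi hmlen]
    by_cases hjm : j = m
    · subst hjm; rw [if_pos rfl, if_pos ⟨hm1, by omega⟩, hziN]
    · rw [if_neg hjm, hZ j]
      by_cases hc : 1 ≤ j ∧ j < m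
      · rw [if_pos hc, if_pos ⟨hc.1, by omega⟩]
      · rw [if_neg hc, if_neg (by omega)]
  -- mi update matches miFold (m+1)
  have hgm : zi = gz l m := by rw [hziN, gz, if_neg (by omega)]
  have hgmi : (Z.set m zi).getD mi 0 = gz l mi := by
    rw [hZ' mi]
    by_cases h0 : mi = 0
    · subst h0; rw [if_neg (by omega), gz, if_pos rfl]
    · rw [if_pos ⟨by omega, by omega⟩, gz, if_neg h0]
  have hmi' : (if zi > (Z.set m zi).getD mi 0 then m else mi) = miFold l (m + 1) := by
    rw [hgmi, hgm, miFold_succ, hmi]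
  -- put the state back together
  split
  · next hcond =>
    refine ⟨by simp [hlen], hZ', hmi', show m < m + 1 by omega,
      show m = 0 → m + zi - 1 = 0 by intro h0; omega, ?_⟩
    show m + zi - 1 < m ∨ m + zi - 1 + 1 ≤ m + matchExt l m 0
    rcases Nat.eq_zero_or_pos zi with hz | hz
    · left; omega
    · right; rw [hziN]; omega
  · next hcond =>
    exact ⟨by simp [hlen], hZ', hmi', show left < m + 1 by omega, hl0, hbox⟩

theorem zloop_inv (l : List Char) (hn : 1 ≤ l.length) :
    ∀ m, 1 ≤ m → m ≤ l.length →
      ZInv l m ((List.range' 1 (m - 1)).foldl (zStep l) (List.replicate l.length 0, 0, 0, 0)) := by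
  intro m
  induction m with
  | zero => omega
  | succ m ih =>
    intro _ hmn
    rcases Nat.eq_zero_or_pos m with rfl | hm
    · -- base case m+1 = 1: nothing processed yet
      simp only [Nat.sub_self, List.range'_zero, List.foldl_nil]
      refine ⟨by simp, ?_, by simp [miFold], show (0:Nat) < 1 by omega, fun _ => rfl, Or.inr ?_⟩
      · intro j
        rw [if_neg (by omega)]
        simp [List.getD_eq_getElem?_getD, List.getElem?_replicate]
        split <;> rfl
      · simp only
        rw [matchExt_zero_left l 0 (by omega)]
        omega
    · have hrange : List.range' 1 (m + 1 - 1) = List.range' 1 (m - 1) ++ [m] := by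
        have h1 : m + 1 - 1 = (m - 1) + 1 := by omega
        rw [h1, List.range'_concat]
        congr 1
        simp
        omega
      rw [hrange, List.foldl_append, List.foldl_cons, List.foldl_nil]
      exact zStep_inv l m _ hm (by omega) (ih hm (by omega))

-- B's z-list read through getD agrees with gz (and is 0 out of range)
theorem zB_getD (l : List Char) (j : Nat) :
    ((List.range l.length).map (fun i => if i = 0 then 0 else matchExt l i 0)).getD j 0 =
      if j < l.length then gz l j else 0 := by
  simp only [List.getD_eq_getElem?_getD, List.getElem?_map, List.getElem?_range']
  by_cases hj : j < l.length
  · simp [List.getElem?_range, hj, gz]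
  · simp [List.getElem?_range, hj]

-- B's argmax fold equals miFold
theorem miB_eq (l : List Char) (hn : 1 ≤ l.length) :
    ∀ m, m ≤ l.length →
      (List.range m).foldl (fun a i =>
        if ((List.range l.length).map (fun i => if i = 0 then 0 else matchExt l i 0)).getD i 0 >
           ((List.range l.length).map (fun i => if i = 0 then 0 else matchExt l i 0)).getD a 0
        then i else a) 0 = miFold l m := by
  intro m
  induction m with
  | zero => simp [miFold]
  | succ m ih =>
    intro hmn
    have hmi : miFold l m < l.length := by
      rcases Nat.eq_zero_or_pos m with rfl | hm
      · simpa [miFold] using hn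
      · have := miFold_lt l m hm; omega
    rw [List.range_succ, List.foldl_append, List.foldl_cons, List.foldl_nil, ih (by omega),
      miFold_succ, zB_getD, zB_getD, if_pos (show m < l.length by omega), if_pos hmi]

-- a conditional running-max step is the same as a conditional max step
theorem stepA_eq_stepM (v : Nat → Nat) (c : Nat → Prop) [DecidablePred c] :
    (fun (k : Nat) (i : Nat) => if v i > k ∧ c i then v i else k) =
      (fun (k : Nat) (i : Nat) => if c i then max k (v i) else k) := by
  funext k i
  by_cases hc : c i
  · by_cases hv : v i > k
    · rw [if_pos ⟨hv, hc⟩, if_pos hc]; omega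
    · rw [if_neg (by tauto), if_pos hc]; omega
  · rw [if_neg (by tauto), if_neg hc]

-- fold of a conditional max over any order equals the filtered-map running max
theorem foldl_condmax_eq (v : Nat → Nat) (c : Nat → Prop) [DecidablePred c] :
    ∀ (L : List Nat) (k0 : Nat),
      L.foldl (fun k i => if c i then max k (v i) else k) k0 =
        ((L.filter (fun i => decide (c i))).map v).foldl max k0 := by
  intro L
  induction L with
  | nil => intro k0; rfl
  | cons x t ih =>
    intro k0
    by_cases hc : c x
    · simp only [List.foldl_cons, List.filter_cons, hc, decide_true, if_pos hc, List.map_cons,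
        List.foldl_cons]
      exact ih (max k0 (v x))
    · simp only [List.foldl_cons, List.filter_cons, hc, decide_false, if_neg hc]
      exact ih k0

theorem foldl_condmax_reverse (v : Nat → Nat) (c : Nat → Prop) [DecidablePred c]
    (L : List Nat) (k0 : Nat) :
    L.reverse.foldl (fun k i => if c i then max k (v i) else k) k0 =
      L.foldl (fun k i => if c i then max k (v i) else k) k0 := by
  refine (L.reverse_perm).foldl_eq' ?_ k0
  intro x _ y _ k
  by_cases hx : c x <;> by_cases hy : c y <;> simp [hx, hy] <;> omega

-- ===== VERDICT =====
theorem min_len_length_spec : Claim_equal_min_len_length := by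
  intro string _ hpre
  unfold Spec_min_len_length min_len_length min_len_length_alt z_function
  simp only
  set l := string.toList with hl
  have hn : 1 ≤ l.length := by
    cases hlist : l with
    | nil => exact absurd hlist hpre
    | cons a t => simp [hlist]
  have hinv := zloop_inv l hn l.length hn le_rfl
  set st := (List.range' 1 (l.length - 1)).foldl (zStep l) (List.replicate l.length 0, 0, 0, 0) with hst
  obtain ⟨hlen, hZ, hmi, -, -, -⟩ := hinv
  -- A's Z array and B's z list agree through getD, everywhere
  have hZB : ∀ j, st.1.getD j 0 =
      ((List.range l.length).map (fun i => if i = 0 then 0 else matchExt l i 0)).getD j 0 := by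
    intro j
    rw [hZ j, zB_getD]
    by_cases hj : j < l.length
    · rw [if_pos hj]
      by_cases h0 : j = 0
      · subst h0; rw [if_neg (by omega), gz, if_pos rfl]
      · rw [if_pos ⟨by omega, hj⟩, gz, if_neg h0]
    · rw [if_neg (by omega), if_neg hj]
  -- the two argmax indices agree
  have hmiB := miB_eq l hn l.length le_rfl
  rw [← hmiB] at hmi
  simp only [hZB, hmi]
  -- now both sides are literally about B's list and index
  split
  · rfl
  · congr 2
    rw [stepA_eq_stepM
      (fun i => ((List.range l.length).map (fun i => if i = 0 then 0 else matchExt l i 0)).getD i 0)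
      (fun i => ((List.range l.length).map (fun i => if i = 0 then 0 else matchExt l i 0)).getD i 0 <
        ((List.range l.length).map (fun i => if i = 0 then 0 else matchExt l i 0)).getD
          ((List.range l.length).foldl (fun a i =>
            if ((List.range l.length).map (fun i => if i = 0 then 0 else matchExt l i 0)).getD i 0 >
               ((List.range l.length).map (fun i => if i = 0 then 0 else matchExt l i 0)).getD a 0
            then i else a) 0) 0 ∧
        i + ((List.range l.length).map (fun i => if i = 0 then 0 else matchExt l i 0)).getD i 0 =
          l.length)]
    rw [foldl_condmax_reverse, foldl_condmax_eq]
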